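-- pv_equiv track=rewrite | github.com/Reza-rn/ServiceRestoration-Distributed | src/Functions.py | FindChildrenBuses
-- ===== SOURCE A (Python) =====
-- def FindChildrenBuses(PDElementsConnections):
--     Children = {}
--     for PDElelement in PDElementsConnections:
--         bus = PDElementsConnections[PDElelement][0]
--         if bus not in Children:
--             Children[bus] = [PDElementsConnections[PDElelement][1]]
--         else:
--             Children[bus].append(PDElementsConnections[PDElelement][1])
--
--     return Children
-- ===== SOURCE B (Python) =====
-- def FindChildrenBuses(PDElementsConnections):
--     pairs = [(conn[0], conn[1]) for conn in PDElementsConnections.values()]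
--     buses = dict.fromkeys(bus for bus, _ in pairs)
--     return {bus: [c for b, c in pairs if b == bus] for bus in buses}
-- ===== Notes on version B (the rewrite author's own statement) =====
-- stated objective: alternative
-- what changed: Replaces the incremental dict-accumulation loop (create-or-append per element) with a declarative two-phase grouping: flatten to parent/child pairs, dedup the parents in first-seen order, then build each group with a per-parent filter comprehension.
import Mathlib
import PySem

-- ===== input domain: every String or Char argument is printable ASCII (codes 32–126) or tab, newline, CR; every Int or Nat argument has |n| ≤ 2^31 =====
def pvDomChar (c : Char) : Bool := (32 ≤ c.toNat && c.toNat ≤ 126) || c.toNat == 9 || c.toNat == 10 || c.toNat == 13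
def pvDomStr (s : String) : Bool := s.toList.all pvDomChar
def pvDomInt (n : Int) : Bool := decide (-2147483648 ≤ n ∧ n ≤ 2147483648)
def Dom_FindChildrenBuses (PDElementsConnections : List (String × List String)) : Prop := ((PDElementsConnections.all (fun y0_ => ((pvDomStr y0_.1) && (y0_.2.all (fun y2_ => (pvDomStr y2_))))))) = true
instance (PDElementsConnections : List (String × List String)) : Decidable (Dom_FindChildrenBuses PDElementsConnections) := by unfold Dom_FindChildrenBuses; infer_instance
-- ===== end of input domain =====

-- B replaces A's incremental create-or-append dict loop with a declarative two-phase
-- grouping (dedup the parent buses, then one filter comprehension per bus); objective: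
-- alternative (same results, different algorithm; not claimed faster).

-- ===== PORT A =====
-- A iterates over the dict's keys and looks each value up; with the dict given as an
-- association list with distinct keys this is a fold over its (key, value) pairs.
def FindChildrenBuses (PDElementsConnections : List (String × List String)) : List (String × List String) :=
  (PDElementsConnections.foldl
    (fun (Children : PySem.Dict String (List String)) kv =>
      let bus := PySem.List.pyGetD kv.2 0 ""          -- conn[0]; total via default, Pre_ guarantees in range
      let child := PySem.List.pyGetD kv.2 1 ""        -- conn[1]
      if Children.contains bus = false then
        Children.insert bus [child]
      else
        Children.insert bus (Children.getD bus [] ++ [child]))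
    PySem.Dict.empty).items

-- ===== PORT B =====
def FindChildrenBuses_alt (PDElementsConnections : List (String × List String)) : List (String × List String) :=
  let pairs := PDElementsConnections.map (fun kv => (PySem.List.pyGetD kv.2 0 "", PySem.List.pyGetD kv.2 1 ""))
  let buses := PySem.List.dedup (pairs.map (·.1))     -- dict.fromkeys: first occurrences in order
  buses.map (fun bus => (bus, (pairs.filter (fun p => p.1 == bus)).map (·.2)))

-- ===== PRECONDITION & SPEC =====
-- Pre_ excludes inputs where some connection list has fewer than 2 entries: there
-- Python A raises IndexError when reading the parent or child bus, and B raises likewise.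
def Pre_FindChildrenBuses (PDElementsConnections : List (String × List String)) : Prop :=
  ∀ kv ∈ PDElementsConnections, 2 ≤ kv.2.length
instance (PDElementsConnections : List (String × List String)) : Decidable (Pre_FindChildrenBuses PDElementsConnections) := by unfold Pre_FindChildrenBuses; infer_instance

def pvWitness_FindChildrenBuses : (List (String × List String)) :=
  [("line1", ["busA", "busB"]), ("line2", ["busA", "busC"])]

def Spec_FindChildrenBuses (PDElementsConnections : List (String × List String)) (out : List (String × List String)) : Prop := out = FindChildrenBuses_alt PDElementsConnections
instance (PDElementsConnections : List (String × List String)) (out : List (String × List String)) : Decidable (Spec_FindChildrenBuses PDElementsConnections out) := by unfold Spec_FindChildrenBuses; infer_instance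

-- ===== CLAIM (what is proved, stated in full; the proofs are below) =====
def Claim_equal_FindChildrenBuses : Prop := ∀ (PDElementsConnections : List (String × List String)), Dom_FindChildrenBuses PDElementsConnections → Pre_FindChildrenBuses PDElementsConnections → Spec_FindChildrenBuses PDElementsConnections (FindChildrenBuses PDElementsConnections)

-- ===== LEMMAS AND PROOFS =====

-- A's create-or-append step is exactly Dict.modify with default [].
theorem stepA_eq_modify (d : PySem.Dict String (List String)) (b c : String) :
    (if d.contains b = false then d.insert b [c]
     else d.insert b (d.getD b [] ++ [c]))
      = d.modify b [] (· ++ [c]) := by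
  by_cases h : d.contains b
  · simp [h, PySem.Dict.modify]
  · have h' : d.contains b = false := by simpa using h
    simp [h', PySem.Dict.modify, PySem.Dict.getD_of_not_contains]

theorem FindChildrenBuses_spec_aux (l : List (String × List String)) :
    FindChildrenBuses l = FindChildrenBuses_alt l := by
  unfold FindChildrenBuses FindChildrenBuses_alt
  have hstep :
      l.foldl
        (fun (Children : PySem.Dict String (List String)) kv =>
          let bus := PySem.List.pyGetD kv.2 0 ""
          let child := PySem.List.pyGetD kv.2 1 ""
          if Children.contains bus = false then
            Children.insert bus [child]
          else
            Children.insert bus (Children.getD bus [] ++ [child]))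
        PySem.Dict.empty
      = (l.map (fun kv => (PySem.List.pyGetD kv.2 0 "", PySem.List.pyGetD kv.2 1 ""))).foldl
          (fun (d : PySem.Dict String (List String)) p => d.modify p.1 [] (· ++ [p.2]))
          PySem.Dict.empty := by
    rw [List.foldl_map]
    exact PySem.List.foldl_congr_mem _ _ _ _ (fun d kv _ => stepA_eq_modify d _ _)
  rw [hstep]
  set pairs := l.map (fun kv => (PySem.List.pyGetD kv.2 0 "", PySem.List.pyGetD kv.2 1 "")) with hpairs
  set D := pairs.foldl (fun (d : PySem.Dict String (List String)) p => d.modify p.1 [] (· ++ [p.2])) PySem.Dict.empty with hD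
  have hnd : D.keys.Nodup := by
    rw [hD]
    exact PySem.Dict.nodup_keys_foldl_modify_key pairs (·.1) [] (fun _ p => (· ++ [p.2])) _
      (by simp [PySem.Dict.keys_empty])
  have hkeys : D.keys = PySem.List.dedup (pairs.map (·.1)) := by
    rw [hD, PySem.Dict.keys_foldl_modify_key]
    simp [PySem.Dict.keys_empty, PySem.List.dedup_eq_ofList, PySem.Set.update,
      PySem.Set.ofList_eq_foldl]
  rw [PySem.Dict.items_eq_map_keys D hnd [], hkeys]
  refine List.map_congr_left (fun b _ => ?_)
  have := PySem.Dict.getD_foldl_modify_append (l := pairs) (d := PySem.Dict.empty) (c := b)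
  rw [hD, this]
  simp

-- ===== VERDICT (by name: the statement is the Claim_ definition above) =====
theorem FindChildrenBuses_spec : Claim_equal_FindChildrenBuses := by
  intro l _ _
  exact FindChildrenBuses_spec_aux l
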